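-- pv_equiv track=rewrite | github.com/rubannn/md-to-pdf | main-typst.py | md_inline_to_typst
-- ===== SOURCE A (Python) =====
-- def md_inline_to_typst(text: str) -> str:
--     result = []
--     i = 0
--     bold = False
--     italic = False
--
--     while i < len(text):
--         # Markdown жирный **
--         if text[i : i + 2] == "**":
--             result.append("*")  # Typst жирный
--             bold = not bold
--             i += 2
--             continue
--
--         # Markdown курсив *
--         if text[i] == "*":
--             result.append("_")  # Typst курсив
--             italic = not italic
--             i += 1
--             continue
--
--         result.append(text[i])
--         i += 1
--
--     return "".join(result)
-- ===== SOURCE B (Python) =====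
-- def md_inline_to_typst(text: str) -> str:
--     # split at bold markers, turn remaining lone '*' into '_', rejoin with typst bold '*'
--     return "*".join(p.replace("*", "_") for p in text.split("**"))
-- ===== Notes on version B (the rewrite author's own statement) =====
-- stated objective: faster
-- what changed: Replaces the index-based while-loop with toggles by a split on the bold marker (whose left-to-right non-overlapping matching equals the loop's two-char lookahead), a per-piece replace of lone italic markers, and a join.
import Mathlib
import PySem

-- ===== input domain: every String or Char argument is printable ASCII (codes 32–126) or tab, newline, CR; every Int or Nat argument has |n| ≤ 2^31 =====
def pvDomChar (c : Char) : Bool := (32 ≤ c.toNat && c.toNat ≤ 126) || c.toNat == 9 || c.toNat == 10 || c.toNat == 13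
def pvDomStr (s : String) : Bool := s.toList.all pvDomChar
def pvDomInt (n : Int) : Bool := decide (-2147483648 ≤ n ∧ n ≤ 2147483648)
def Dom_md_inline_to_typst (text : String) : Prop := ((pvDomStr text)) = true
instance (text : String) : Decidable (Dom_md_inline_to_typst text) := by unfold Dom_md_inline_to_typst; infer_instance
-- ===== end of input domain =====

-- B replaces A's index loop (with unused bold/italic toggles) by split-on-'**' / replace / join; same result, idiomatic.

-- ===== PORT A =====
-- the while-loop: remaining suffix, reversed `result`, bold/italic toggles
def mdA_go : List Char → List Char → Bool → Bool → List Char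
  | '*' :: '*' :: rest, res, bold, italic => mdA_go rest ('*' :: res) (!bold) italic
  | '*' :: rest, res, bold, italic => mdA_go rest ('_' :: res) bold (!italic)
  | c :: rest, res, bold, italic => mdA_go rest (c :: res) bold italic
  | [], res, _, _ => res.reverse

def md_inline_to_typst (text : String) : String :=
  String.ofList (mdA_go text.toList [] false false)

-- ===== PORT B =====
def md_inline_to_typst_alt (text : String) : String :=
  String.ofList (PySem.Chars.join ['*']
    ((PySem.Chars.splitOn text.toList ['*', '*']).map
      (fun p => PySem.Chars.replace p ['*'] ['_'])))

-- ===== PRECONDITION & SPEC =====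
def Spec_md_inline_to_typst (text : String) (out : String) : Prop := out = md_inline_to_typst_alt text
instance (text : String) (out : String) : Decidable (Spec_md_inline_to_typst text out) := by unfold Spec_md_inline_to_typst; infer_instance

-- ===== CLAIM (what is proved, stated in full; the proofs are below) =====
def Claim_equal_md_inline_to_typst : Prop := ∀ (text : String), Dom_md_inline_to_typst text → Spec_md_inline_to_typst text (md_inline_to_typst text)

-- ===== LEMMAS AND PROOFS =====

-- canonical form of the translation
def pvF : List Char → List Char
  | '*' :: '*' :: r => '*' :: pvF r
  | '*' :: r => '_' :: pvF r
  | c :: r => c :: pvF r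
  | [] => []

def pvSub (c : Char) : Char := if c = '*' then '_' else c

-- canonical split at non-overlapping '**', left to right
def pvSplitA : List Char → List (List Char)
  | '*' :: '*' :: r => [] :: pvSplitA r
  | c :: r =>
    match pvSplitA r with
    | h :: t => (c :: h) :: t
    | [] => [[c]]
  | [] => [[]]

lemma pvSplitA_ne_nil (l : List Char) : pvSplitA l ≠ [] := by
  fun_induction pvSplitA l <;> simp_all

lemma mdA_go_eq (l res : List Char) (b i : Bool) :
    mdA_go l res b i = res.reverse ++ pvF l := by
  fun_induction mdA_go l res b i <;> simp_all [pvF]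

lemma pvF_two_star (r : List Char) : pvF ('*' :: '*' :: r) = '*' :: pvF r := by
  simp [pvF]

lemma pvF_cons (c : Char) (r : List Char) (h : ¬(c = '*' ∧ r.head? = some '*')) :
    pvF (c :: r) = pvSub c :: pvF r := by
  cases r with
  | nil => by_cases hc : c = '*' <;> simp [pvF, pvSub, hc]
  | cons c2 r' =>
    by_cases hc : c = '*'
    · subst hc
      have hc2 : c2 ≠ '*' := fun h2 => h ⟨rfl, by simp [h2]⟩
      simp [pvF, pvSub, hc2]
    · simp [pvF, pvSub, hc]

-- prepend to the head piece
def pvConsHead (p : List Char) : List (List Char) → List (List Char)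
  | h :: t => (p ++ h) :: t
  | [] => [p]

lemma pvSplitA_two_star (r : List Char) : pvSplitA ('*' :: '*' :: r) = [] :: pvSplitA r := by
  simp [pvSplitA]

lemma pvSplitA_cons (c : Char) (r : List Char) (h : ¬(c = '*' ∧ r.head? = some '*')) :
    pvSplitA (c :: r) = pvConsHead [c] (pvSplitA r) := by
  cases r with
  | nil => by_cases hc : c = '*' <;> simp [pvSplitA, pvConsHead, hc]
  | cons c2 r' =>
    by_cases hc : c = '*'
    · subst hc
      have hc2 : c2 ≠ '*' := fun h2 => h ⟨rfl, by simp [h2]⟩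
      cases hr : pvSplitA (c2 :: r') with
      | nil => exact absurd hr (pvSplitA_ne_nil _)
      | cons sh st => simp [pvSplitA, pvConsHead, hc2, hr]
    · cases hr : pvSplitA (c2 :: r') with
      | nil => exact absurd hr (pvSplitA_ne_nil _)
      | cons sh st => simp [pvSplitA, pvConsHead, hc, hr]

lemma replace_go_star (fuel : Nat) (l acc : List Char) (h : l.length ≤ fuel) :
    PySem.Chars.replace.go ['*'] ['_'] fuel l acc = acc.reverse ++ l.map pvSub := by
  induction fuel generalizing l acc with
  | zero =>
    have : l = [] := List.eq_nil_of_length_eq_zero (Nat.le_zero.mp h)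
    subst this; simp [PySem.Chars.replace.go]
  | succ n ih =>
    cases l with
    | nil => simp [PySem.Chars.replace.go]
    | cons c t =>
      by_cases hc : c = '*'
      · subst hc
        rw [show PySem.Chars.replace.go ['*'] ['_'] (n+1) ('*'::t) acc
              = PySem.Chars.replace.go ['*'] ['_'] n t ('_'::acc) by
            simp [PySem.Chars.replace.go, List.isPrefixOf]]
        rw [ih t ('_'::acc) (by simpa using Nat.le_of_succ_le_succ h)]
        simp [pvSub]
      · rw [show PySem.Chars.replace.go ['*'] ['_'] (n+1) (c::t) acc
              = PySem.Chars.replace.go ['*'] ['_'] n t (c::acc) by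
            simp [PySem.Chars.replace.go, List.isPrefixOf,
                  show ¬('*' = c) from fun h2 => hc h2.symm]]
        rw [ih t (c::acc) (by simpa using Nat.le_of_succ_le_succ h)]
        simp [pvSub, hc]

lemma replace_star (p : List Char) :
    PySem.Chars.replace p ['*'] ['_'] = p.map pvSub := by
  simpa using replace_go_star p.length p [] (le_refl _)

lemma splitOn_go_star (fuel : Nat) (l cur : List Char) (acc : List (List Char))
    (h : l.length ≤ fuel) :
    PySem.Chars.splitOn.go ['*','*'] fuel l cur acc
      = acc.reverse ++ pvConsHead cur.reverse (pvSplitA l) := by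
  induction fuel generalizing l cur acc with
  | zero =>
    have : l = [] := List.eq_nil_of_length_eq_zero (Nat.le_zero.mp h)
    subst this; simp [PySem.Chars.splitOn.go, pvSplitA, pvConsHead]
  | succ n ih =>
    cases l with
    | nil => simp [PySem.Chars.splitOn.go, pvSplitA, pvConsHead]
    | cons c t =>
      by_cases hp : (['*','*'] : List Char).isPrefixOf (c :: t)
      · obtain ⟨c2, r, rfl⟩ : ∃ c2 r, t = c2 :: r := by
          cases t with
          | nil => simp [List.isPrefixOf] at hp
          | cons c2 r => exact ⟨c2, r, rfl⟩
        obtain ⟨h1, h2⟩ : '*' = c ∧ '*' = c2 := by simpa [List.isPrefixOf] using hp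
        subst h1; subst h2
        rw [show PySem.Chars.splitOn.go ['*','*'] (n+1) ('*'::'*'::r) cur acc
              = PySem.Chars.splitOn.go ['*','*'] n r [] (cur.reverse :: acc) by
            simp [PySem.Chars.splitOn.go, List.isPrefixOf]]
        rw [ih r [] (cur.reverse :: acc) (by simp at h; omega)]
        cases hr : pvSplitA r with
        | nil => exact absurd hr (pvSplitA_ne_nil r)
        | cons sh st => simp [pvSplitA_two_star, pvConsHead, hr]
      · rw [show PySem.Chars.splitOn.go ['*','*'] (n+1) (c::t) cur acc
              = PySem.Chars.splitOn.go ['*','*'] n t (c :: cur) acc by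
            simp only [PySem.Chars.splitOn.go]
            rw [if_neg hp]]
        rw [ih t (c :: cur) acc (by simp at h; omega)]
        have hnb : ¬(c = '*' ∧ t.head? = some '*') := by
          rintro ⟨rfl, ht⟩
          cases t with
          | nil => simp at ht
          | cons c2 r =>
            simp at ht
            exact hp (by simp [ht, List.isPrefixOf])
        rw [pvSplitA_cons c t hnb]
        cases ht : pvSplitA t with
        | nil => exact absurd ht (pvSplitA_ne_nil t)
        | cons sh st => simp [pvConsHead]

lemma splitOn_star (l : List Char) :
    PySem.Chars.splitOn l ['*','*'] = pvSplitA l := by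
  rw [show PySem.Chars.splitOn l ['*','*']
        = PySem.Chars.splitOn.go ['*','*'] (l.length + 1) l [] [] from rfl]
  rw [splitOn_go_star (l.length + 1) l [] [] (by omega)]
  cases h : pvSplitA l with
  | nil => exact absurd h (pvSplitA_ne_nil l)
  | cons sh st => simp [pvConsHead]

lemma intercalate_cons_cons (s a b : List Char) (l : List (List Char)) :
    List.intercalate s (a :: b :: l) = a ++ s ++ List.intercalate s (b :: l) := by
  simp [List.intercalate, List.intersperse]

lemma join_map_splitA (l : List Char) :
    PySem.Chars.join ['*'] ((pvSplitA l).map (List.map pvSub)) = pvF l := by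
  fun_induction pvSplitA l with
  | case1 r ih =>
    cases hr : pvSplitA r with
    | nil => exact absurd hr (pvSplitA_ne_nil r)
    | cons sh st =>
      rw [hr] at ih
      simp only [List.map_cons, PySem.Chars.join] at ih ⊢
      rw [intercalate_cons_cons, pvF_two_star]
      simp [ih]
  | case2 c r hne sh st hr ih =>
    have hnb : ¬(c = '*' ∧ r.head? = some '*') := by
      rintro ⟨rfl, ht⟩
      cases r with
      | nil => simp at ht
      | cons c2 r' => simp at ht; exact hne r' rfl (by simp [ht])
    simp only [List.map_cons, PySem.Chars.join] at ih ⊢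
    have hstep : List.intercalate ['*'] (((c :: sh).map pvSub) :: st.map (List.map pvSub))
        = pvSub c :: List.intercalate ['*'] ((sh.map pvSub) :: st.map (List.map pvSub)) := by
      cases st with
      | nil => simp [List.intercalate]
      | cons x xs =>
        simp only [List.map_cons]
        rw [intercalate_cons_cons, intercalate_cons_cons]
        simp
    simp only [List.map_cons] at hstep
    rw [hstep]
    rw [hr] at ih
    simp only [List.map_cons] at ih
    rw [ih, pvF_cons c r hnb]
  | case3 c r hne hr ih => exact absurd hr (pvSplitA_ne_nil r)
  | case4 => simp [pvF, PySem.Chars.join, List.intercalate]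

-- ===== VERDICT (by name: the statement is the Claim_ definition above) =====
theorem md_inline_to_typst_spec : Claim_equal_md_inline_to_typst := by
  intro text _
  unfold Spec_md_inline_to_typst md_inline_to_typst md_inline_to_typst_alt
  rw [mdA_go_eq, splitOn_star]
  have : (pvSplitA text.toList).map (fun p => PySem.Chars.replace p ['*'] ['_'])
      = (pvSplitA text.toList).map (List.map pvSub) := by
    apply List.map_congr_left; intro p _; exact replace_star p
  rw [this, join_map_splitA]
  simp
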